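-- pv_equiv track=rewrite | github.com/wattssafetyinstalls-debug/wattssafetyinstalls-debug.github.io | batch_update_qa_from_csv.py | get_icon_for_question
-- ===== SOURCE A (Python) =====
-- def get_icon_for_question(question_text):
--     """Determine appropriate Font Awesome icon based on question content"""
--     question_lower = question_text.lower()
--
--     if any(word in question_lower for word in ['cost', 'price', 'affordable', 'budget']):
--         return 'fa-dollar-sign'
--     elif any(word in question_lower for word in ['how long', 'timeline', 'duration']):
--         return 'fa-clock'
--     elif any(word in question_lower for word in ['install', 'installation', 'build']):
--         return 'fa-hammer'
--     elif any(word in question_lower for word in ['difference', 'vs', 'vs.']):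
--         return 'fa-balance-scale'
--     elif any(word in question_lower for word in ['maintenance', 'care', 'clean']):
--         return 'fa-broom'
--     elif any(word in question_lower for word in ['location', 'near', 'service']):
--         return 'fa-map-marker-alt'
--     elif any(word in question_lower for word in ['safety', 'safe', 'prevent']):
--         return 'fa-shield-alt'
--     elif any(word in question_lower for word in ['accessibility', 'wheelchair', 'ada']):
--         return 'fa-wheelchair'
--     elif any(word in question_lower for word in ['professional', 'contractor', 'expert']):
--         return 'fa-user-tie'
--     elif any(word in question_lower for word in ['material', 'type', 'option', 'options']):
--         return 'fa-list'
--     elif any(word in question_lower for word in ['design', 'style', 'custom']):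
--         return 'fa-palette'
--     else:
--         return 'fa-info-circle'
-- ===== SOURCE B (Python) =====
-- # Flat keyword -> (priority, icon) map; one pass over ALL keywords keeping the
-- # minimum-priority match (no grouped first-match cascade, no early exit).
-- KEYWORD_ICON = {
--     'cost': (0, 'fa-dollar-sign'), 'price': (0, 'fa-dollar-sign'),
--     'affordable': (0, 'fa-dollar-sign'), 'budget': (0, 'fa-dollar-sign'),
--     'how long': (1, 'fa-clock'), 'timeline': (1, 'fa-clock'), 'duration': (1, 'fa-clock'),
--     'install': (2, 'fa-hammer'), 'installation': (2, 'fa-hammer'), 'build': (2, 'fa-hammer'),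
--     'difference': (3, 'fa-balance-scale'), 'vs': (3, 'fa-balance-scale'), 'vs.': (3, 'fa-balance-scale'),
--     'maintenance': (4, 'fa-broom'), 'care': (4, 'fa-broom'), 'clean': (4, 'fa-broom'),
--     'location': (5, 'fa-map-marker-alt'), 'near': (5, 'fa-map-marker-alt'), 'service': (5, 'fa-map-marker-alt'),
--     'safety': (6, 'fa-shield-alt'), 'safe': (6, 'fa-shield-alt'), 'prevent': (6, 'fa-shield-alt'),
--     'accessibility': (7, 'fa-wheelchair'), 'wheelchair': (7, 'fa-wheelchair'), 'ada': (7, 'fa-wheelchair'),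
--     'professional': (8, 'fa-user-tie'), 'contractor': (8, 'fa-user-tie'), 'expert': (8, 'fa-user-tie'),
--     'material': (9, 'fa-list'), 'type': (9, 'fa-list'), 'option': (9, 'fa-list'), 'options': (9, 'fa-list'),
--     'design': (10, 'fa-palette'), 'style': (10, 'fa-palette'), 'custom': (10, 'fa-palette'),
-- }
--
-- def get_icon_for_question(question_text):
--     question_lower = question_text.lower()
--     best = None
--     for word, (prio, icon) in KEYWORD_ICON.items():
--         if word in question_lower and (best is None or prio < best[0]):
--             best = (prio, icon)
--     return best[1] if best is not None else 'fa-info-circle'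
-- ===== Notes on version B (the rewrite author's own statement) =====
-- stated objective: alternative
-- what changed: Replaces the eleven-branch first-match cascade by a flat keyword->(priority,icon) map scanned in one full pass that keeps the minimum-priority matching keyword (no early exit, no grouping).
import Mathlib
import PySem

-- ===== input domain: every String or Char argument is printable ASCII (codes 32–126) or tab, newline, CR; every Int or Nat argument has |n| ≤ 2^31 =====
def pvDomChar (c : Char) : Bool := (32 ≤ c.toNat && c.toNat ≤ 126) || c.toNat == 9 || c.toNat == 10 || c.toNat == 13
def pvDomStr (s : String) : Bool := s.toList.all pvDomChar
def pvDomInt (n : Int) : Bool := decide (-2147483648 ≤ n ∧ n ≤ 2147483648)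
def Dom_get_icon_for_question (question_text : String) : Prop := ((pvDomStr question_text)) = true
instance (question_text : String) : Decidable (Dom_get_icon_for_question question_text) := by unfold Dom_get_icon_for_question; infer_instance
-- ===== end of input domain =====

-- B replaces A's first-match cascade by a flat keyword->(priority,icon) map scanned in one full
-- pass keeping the minimum-priority matching keyword (objective: alternative, same cost).

-- ===== PORT A =====
def get_icon_for_question (question_text : String) : String :=
  let question_lower := PySem.Str.lower question_text
  if (["cost", "price", "affordable", "budget"] : List String).any (fun word => PySem.Str.isIn word question_lower) then "fa-dollar-sign"
  else
  if (["how long", "timeline", "duration"] : List String).any (fun word => PySem.Str.isIn word question_lower) then "fa-clock"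
  else
  if (["install", "installation", "build"] : List String).any (fun word => PySem.Str.isIn word question_lower) then "fa-hammer"
  else
  if (["difference", "vs", "vs."] : List String).any (fun word => PySem.Str.isIn word question_lower) then "fa-balance-scale"
  else
  if (["maintenance", "care", "clean"] : List String).any (fun word => PySem.Str.isIn word question_lower) then "fa-broom"
  else
  if (["location", "near", "service"] : List String).any (fun word => PySem.Str.isIn word question_lower) then "fa-map-marker-alt"
  else
  if (["safety", "safe", "prevent"] : List String).any (fun word => PySem.Str.isIn word question_lower) then "fa-shield-alt"
  else
  if (["accessibility", "wheelchair", "ada"] : List String).any (fun word => PySem.Str.isIn word question_lower) then "fa-wheelchair"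
  else
  if (["professional", "contractor", "expert"] : List String).any (fun word => PySem.Str.isIn word question_lower) then "fa-user-tie"
  else
  if (["material", "type", "option", "options"] : List String).any (fun word => PySem.Str.isIn word question_lower) then "fa-list"
  else
  if (["design", "style", "custom"] : List String).any (fun word => PySem.Str.isIn word question_lower) then "fa-palette"
  else
  "fa-info-circle"

-- ===== PORT B =====
-- flat keyword -> (priority, icon) association list, insertion order of Source B's dict
def kwTable : List (String × Int × String) := [
  ("cost", 0, "fa-dollar-sign"), ("price", 0, "fa-dollar-sign"),
  ("affordable", 0, "fa-dollar-sign"), ("budget", 0, "fa-dollar-sign"),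
  ("how long", 1, "fa-clock"), ("timeline", 1, "fa-clock"), ("duration", 1, "fa-clock"),
  ("install", 2, "fa-hammer"), ("installation", 2, "fa-hammer"), ("build", 2, "fa-hammer"),
  ("difference", 3, "fa-balance-scale"), ("vs", 3, "fa-balance-scale"), ("vs.", 3, "fa-balance-scale"),
  ("maintenance", 4, "fa-broom"), ("care", 4, "fa-broom"), ("clean", 4, "fa-broom"),
  ("location", 5, "fa-map-marker-alt"), ("near", 5, "fa-map-marker-alt"), ("service", 5, "fa-map-marker-alt"),
  ("safety", 6, "fa-shield-alt"), ("safe", 6, "fa-shield-alt"), ("prevent", 6, "fa-shield-alt"),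
  ("accessibility", 7, "fa-wheelchair"), ("wheelchair", 7, "fa-wheelchair"), ("ada", 7, "fa-wheelchair"),
  ("professional", 8, "fa-user-tie"), ("contractor", 8, "fa-user-tie"), ("expert", 8, "fa-user-tie"),
  ("material", 9, "fa-list"), ("type", 9, "fa-list"), ("option", 9, "fa-list"), ("options", 9, "fa-list"),
  ("design", 10, "fa-palette"), ("style", 10, "fa-palette"), ("custom", 10, "fa-palette")]

-- one loop iteration: keep the match of minimum priority seen so far
def bestStep (ql : String) (best : Option (Int × String)) (e : String × Int × String) : Option (Int × String) :=
  match best with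
  | none => if PySem.Str.isIn e.1 ql then some (e.2.1, e.2.2) else none
  | some (q, s) => if PySem.Str.isIn e.1 ql && decide (e.2.1 < q) then some (e.2.1, e.2.2) else some (q, s)

def get_icon_for_question_alt (question_text : String) : String :=
  let question_lower := PySem.Str.lower question_text
  match kwTable.foldl (bestStep question_lower) none with
  | some (_, icon) => icon
  | none => "fa-info-circle"

-- ===== PRECONDITION & SPEC =====
def Spec_get_icon_for_question (question_text : String) (out : String) : Prop := out = get_icon_for_question_alt question_text
instance (question_text : String) (out : String) : Decidable (Spec_get_icon_for_question question_text out) := by unfold Spec_get_icon_for_question; infer_instance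

-- ===== CLAIM =====
def Claim_equal_get_icon_for_question : Prop := ∀ (question_text : String), Dom_get_icon_for_question question_text → Spec_get_icon_for_question question_text (get_icon_for_question question_text)

-- ===== LEMMAS AND PROOFS =====

-- a whole keyword group of the flat table: words ws with common priority p and icon
def gp (p : Int) (icon : String) (ws : List String) : List (String × Int × String) :=
  ws.map (fun w => (w, p, icon))

-- the grouped view of kwTable (priority, icon, keywords), in priority order
def theGroups : List (Int × String × List String) := [
  (0, "fa-dollar-sign", ["cost", "price", "affordable", "budget"]),
  (1, "fa-clock", ["how long", "timeline", "duration"]),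
  (2, "fa-hammer", ["install", "installation", "build"]),
  (3, "fa-balance-scale", ["difference", "vs", "vs."]),
  (4, "fa-broom", ["maintenance", "care", "clean"]),
  (5, "fa-map-marker-alt", ["location", "near", "service"]),
  (6, "fa-shield-alt", ["safety", "safe", "prevent"]),
  (7, "fa-wheelchair", ["accessibility", "wheelchair", "ada"]),
  (8, "fa-user-tie", ["professional", "contractor", "expert"]),
  (9, "fa-list", ["material", "type", "option", "options"]),
  (10, "fa-palette", ["design", "style", "custom"])]

-- A's cascade, abstractly: first group with a matching keyword wins
def cascade (ql : String) : List (Int × String × List String) → String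
  | [] => "fa-info-circle"
  | g :: gs => if g.2.2.any (fun w => PySem.Str.isIn w ql) then g.2.1 else cascade ql gs

theorem fold_keep (ql : String) (q : Int) (s : String) (p : Int) (icon : String)
    (ws : List String) (h : q ≤ p) :
    List.foldl (bestStep ql) (some (q, s)) (gp p icon ws) = some (q, s) := by
  induction ws with
  | nil => rfl
  | cons w ws ih =>
    have hstep : bestStep ql (some (q, s)) (w, p, icon) = some (q, s) := by
      simp [bestStep, not_lt.mpr h]
    simp only [gp, List.map, List.foldl] at ih ⊢
    rw [hstep]
    exact ih

theorem fold_none (ql : String) (p : Int) (icon : String) (ws : List String) :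
    List.foldl (bestStep ql) none (gp p icon ws)
      = if ws.any (fun w => PySem.Str.isIn w ql) then some (p, icon) else none := by
  induction ws with
  | nil => rfl
  | cons w ws ih =>
    simp only [gp, List.map, List.foldl, List.any_cons] at ih ⊢
    by_cases hw : PySem.Str.isIn w ql = true
    · have hstep : bestStep ql none (w, p, icon) = some (p, icon) := by
        simp only [bestStep, if_pos hw]
      rw [hstep, if_pos (by rw [hw, Bool.true_or])]
      exact fold_keep ql p icon p icon ws le_rfl
    · have hstep : bestStep ql none (w, p, icon) = none := by
        simp only [bestStep, if_neg hw]
      have hw' : PySem.Str.isIn w ql = false := Bool.not_eq_true _ ▸ eq_false_of_ne_true hw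
      rw [hstep, ih]
      simp only [hw', Bool.false_or]

theorem fold_keep_groups (ql : String) (q : Int) (s : String)
    (gs : List (Int × String × List String)) (h : ∀ g ∈ gs, q ≤ g.1) :
    List.foldl (bestStep ql) (some (q, s)) ((gs.map (fun g => gp g.1 g.2.1 g.2.2)).flatten)
      = some (q, s) := by
  induction gs with
  | nil => rfl
  | cons g gs ih =>
    simp only [List.map_cons, List.flatten_cons, List.foldl_append]
    rw [fold_keep ql q s g.1 g.2.1 g.2.2 (h g (List.mem_cons_self))]
    exact ih (fun g' hg' => h g' (List.mem_cons_of_mem _ hg'))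

theorem fold_groups (ql : String) (gs : List (Int × String × List String))
    (h : gs.Pairwise (fun a b => a.1 ≤ b.1)) :
    (match List.foldl (bestStep ql) none ((gs.map (fun g => gp g.1 g.2.1 g.2.2)).flatten) with
     | some (_, i) => i
     | none => "fa-info-circle") = cascade ql gs := by
  induction gs with
  | nil => rfl
  | cons g gs ih =>
    rcases List.pairwise_cons.mp h with ⟨h1, h2⟩
    simp only [List.map_cons, List.flatten_cons, List.foldl_append]
    rw [fold_none]
    by_cases hm : g.2.2.any (fun w => PySem.Str.isIn w ql) = true
    · rw [if_pos hm, fold_keep_groups ql g.1 g.2.1 gs h1]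
      simp only [cascade]
      rw [if_pos hm]
    · rw [if_neg hm]
      rw [ih h2]
      simp only [cascade, if_neg hm]

-- ===== VERDICT =====
theorem get_icon_for_question_spec : Claim_equal_get_icon_for_question := by
  intro q _
  unfold Spec_get_icon_for_question
  have h := fold_groups (PySem.Str.lower q) theGroups (by decide)
  calc get_icon_for_question q
      = cascade (PySem.Str.lower q) theGroups := rfl
    _ = (match List.foldl (bestStep (PySem.Str.lower q)) none
            ((theGroups.map (fun g => gp g.1 g.2.1 g.2.2)).flatten) with
         | some (_, i) => i
         | none => "fa-info-circle") := h.symm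
    _ = get_icon_for_question_alt q := rfl
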